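-- pv_equiv track=rewrite | github.com/isabert/programming_questions_binarysearch.com | Q135_Transpose_Of_A_Matrix.py | solve
-- ===== SOURCE A (Python) =====
-- def solve(matrix):
--     if(matrix==[]): return []
--     n = len(matrix)
--     m = len(matrix[0])
--
--     transpose = [[0]*n for j in range(m)]
--
--     for i in range(n):
--         for j in range(m):
--             transpose[j][i] = matrix[i][j]
--
--     return transpose
-- ===== SOURCE B (Python) =====
-- def solve(matrix):
--     if matrix == []:
--         return []
--     m = len(matrix[0])
--     flat = [x for row in matrix for x in row[:m]]
--     return [flat[j::m] for j in range(m)]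
-- ===== Notes on version B (the rewrite author's own statement) =====
-- stated objective: alternative
-- what changed: Replaces the preallocated m-by-n grid filled by per-element index assignment with a flatten-then-stride scheme: flatten the first m entries of each row into one flat list, then read each output row as the strided slice flat[j::m].
import Mathlib
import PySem

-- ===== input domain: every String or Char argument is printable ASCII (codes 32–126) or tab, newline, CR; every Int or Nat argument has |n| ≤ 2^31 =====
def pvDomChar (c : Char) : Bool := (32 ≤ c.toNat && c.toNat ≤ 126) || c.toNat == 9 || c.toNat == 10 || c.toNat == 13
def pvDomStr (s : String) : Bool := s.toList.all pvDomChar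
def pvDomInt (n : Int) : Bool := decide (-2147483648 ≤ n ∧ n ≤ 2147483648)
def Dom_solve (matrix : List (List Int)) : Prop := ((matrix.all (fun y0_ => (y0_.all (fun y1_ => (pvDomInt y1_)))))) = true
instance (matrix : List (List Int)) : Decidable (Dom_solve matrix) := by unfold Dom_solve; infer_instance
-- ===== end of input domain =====

-- B replaces A's preallocated m×n grid filled by per-element index assignment with a
-- flatten-then-stride scheme: flatten the first m entries of every row into one flat
-- list, then read each output row as the strided slice flat[j::m]; equivalence is
-- claimed where A returns.

-- ===== PORT A =====
-- transliteration of A: guard, build the m×n zero grid, then transpose[j][i] = matrix[i][j]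
def solve (matrix : List (List Int)) : List (List Int) :=
  if matrix = [] then [] else
    let n := matrix.length
    let m := (matrix.headI).length
    let transpose := (List.range m).map (fun _ => List.replicate n (0 : Int))
    (List.range n).foldl (fun t i =>
      (List.range m).foldl (fun t j =>
        t.set j ((t.getD j []).set i ((matrix.getD i []).getD j 0))) t) transpose

-- ===== PORT B =====
-- Python's strided slice xs[j::step] for 0 ≤ j and step ≥ 1: drop j, then take every
-- step-th element.  Exact for these arguments (a nonnegative start clamps like drop;
-- a positive step walks indices j, j+step, …), which is how Source B calls it.
def pvStride (step : Nat) : List Int → List Int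
  | [] => []
  | x :: xs => x :: pvStride step (xs.drop (step - 1))
termination_by xs => xs.length
decreasing_by simp

-- transliteration of B: row[:m] is List.take m (PySem.List.slice_to_natCast),
-- flat[j::m] is pvStride m (flat.drop j)
def solve_alt (matrix : List (List Int)) : List (List Int) :=
  if matrix = [] then [] else
    let m := (matrix.headI).length
    let flat := matrix.flatMap (fun row => row.take m)
    (List.range m).map (fun j => pvStride m (flat.drop j))

-- ===== PRECONDITION & SPEC =====
-- Pre_solve is exactly A's return domain: A raises IndexError iff some row is shorter
-- than the first row (it reads matrix[i][j] for every j < len(matrix[0])).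
def Pre_solve (matrix : List (List Int)) : Prop :=
  ∀ r ∈ matrix, (matrix.headI).length ≤ r.length
instance (matrix : List (List Int)) : Decidable (Pre_solve matrix) := by unfold Pre_solve; infer_instance

def pvWitness_solve : List (List Int) := [[1, 2], [3, 4], [5, 6]]

def Spec_solve (matrix : List (List Int)) (out : List (List Int)) : Prop := out = solve_alt matrix
instance (matrix : List (List Int)) (out : List (List Int)) : Decidable (Spec_solve matrix out) := by unfold Spec_solve; infer_instance

-- ===== CLAIM (what is proved, stated in full; the proofs are below) =====
def Claim_equal_solve : Prop := ∀ (matrix : List (List Int)), Dom_solve matrix → Pre_solve matrix → Spec_solve matrix (solve matrix)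

-- ===== LEMMAS AND PROOFS =====

-- length is preserved by a fold of single `set` steps
theorem pvFoldlSetLength (g : List (List Int) → Nat → List Int) (ks : List Nat)
    (t : List (List Int)) :
    (ks.foldl (fun t j => t.set j (g t j)) t).length = t.length := by
  induction ks generalizing t with
  | nil => rfl
  | cons k ks ih => simp [List.foldl_cons, ih]

-- characterization of A's inner loop (over columns j) at one position j0
theorem pvInnerGet (i : Nat) (f : Nat → Int) (k : Nat) (t : List (List Int)) (j0 : Nat) :
    ((List.range k).foldl (fun t j => t.set j ((t.getD j []).set i (f j))) t)[j0]?
      = if j0 < k then t[j0]?.map (fun col => col.set i (f j0)) else t[j0]? := by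
  induction k with
  | zero => simp
  | succ k ih =>
    rw [List.range_succ, List.foldl_append, List.foldl_cons, List.foldl_nil,
      List.getElem?_set]
    by_cases h : k = j0
    · obtain rfl := h
      rw [if_pos rfl, pvFoldlSetLength (fun t j => (t.getD j []).set i (f j))]
      have hgd : ((List.range k).foldl
          (fun t j => t.set j ((t.getD j []).set i (f j))) t).getD k []
          = t.getD k [] := by
        rw [List.getD_eq_getElem?_getD, List.getD_eq_getElem?_getD, ih]
        simp
      rw [hgd, if_pos (Nat.lt_succ_self k), List.getD_eq_getElem?_getD]
      cases hx : t[k]? with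
      | none =>
        have hnlt : ¬ k < t.length := by
          intro hlt; rw [List.getElem?_eq_getElem hlt] at hx; cases hx
        simp [hnlt]
      | some col =>
        have hlt : k < t.length := by
          by_contra hlt
          rw [List.getElem?_eq_none (by omega)] at hx; cases hx
        simp [hlt]
    · rw [if_neg h, ih]
      by_cases h2 : j0 < k
      · rw [if_pos h2, if_pos (by omega)]
      · rw [if_neg h2, if_neg (by omega)]

-- characterization of A's outer loop at a column index j0 < m
theorem pvOuterGet (m : Nat) (g : Nat → Nat → Int) (ks : List Nat) (t : List (List Int))
    (ht : t.length = m) (j0 : Nat) (hj : j0 < m) :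
    ((ks.foldl (fun t i =>
        (List.range m).foldl (fun t j => t.set j ((t.getD j []).set i (g i j))) t) t)[j0]?)
      = some (ks.foldl (fun col i => col.set i (g i j0)) (t.getD j0 [])) := by
  induction ks generalizing t with
  | nil =>
    rw [List.foldl_nil, List.foldl_nil, List.getD_eq_getElem?_getD,
      List.getElem?_eq_getElem (ht ▸ hj)]
    simp
  | cons i ks ih =>
    rw [List.foldl_cons, List.foldl_cons]
    have ht' : ((List.range m).foldl
        (fun t j => t.set j ((t.getD j []).set i (g i j))) t).length = m := by
      rw [pvFoldlSetLength (fun t j => (t.getD j []).set i (g i j))]; exact ht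
    rw [ih _ ht']
    congr 1
    rw [List.getD_eq_getElem?_getD, pvInnerGet, if_pos hj, List.getD_eq_getElem?_getD,
      List.getElem?_eq_getElem (ht ▸ hj)]
    simp

-- auxiliary: the column fold over range k fills the first k positions of the zero column
theorem pvColFoldAux (nn : Nat) (h : Nat → Int) (k : Nat) (hk : k ≤ nn) :
    (List.range k).foldl (fun col i => col.set i (h i)) (List.replicate nn (0 : Int))
      = (List.range nn).map (fun i => if i < k then h i else 0) := by
  induction k with
  | zero =>
    simp [List.foldl_nil, List.map_const']
  | succ k ih =>
    rw [List.range_succ, List.foldl_append, List.foldl_cons, List.foldl_nil,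
      ih (by omega)]
    apply List.ext_getElem
    · simp
    · intro j h1 h2
      rw [List.getElem_set]
      simp only [List.getElem_map, List.getElem_range]
      have hj : j < nn := by simpa using h2
      by_cases hjk : k = j
      · subst hjk; simp
      · rw [if_neg hjk]
        by_cases h3 : j < k
        · rw [if_pos h3, if_pos (by omega)]
        · rw [if_neg h3, if_neg (by omega)]

-- the column fold writes every position exactly once: it equals a plain map
theorem pvColFold (nn : Nat) (h : Nat → Int) :
    (List.range nn).foldl (fun col i => col.set i (h i)) (List.replicate nn (0 : Int))
      = (List.range nn).map h := by
  rw [pvColFoldAux nn h nn (le_refl nn)]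
  apply List.map_congr_left
  intro i hi
  rw [if_pos (List.mem_range.mp hi)]

-- length is preserved by A's outer loop
theorem pvOuterLength (m : Nat) (g : Nat → Nat → Int) (ks : List Nat) (t : List (List Int)) :
    (ks.foldl (fun t i =>
      (List.range m).foldl (fun t j => t.set j ((t.getD j []).set i (g i j))) t) t).length
      = t.length := by
  induction ks generalizing t with
  | nil => rfl
  | cons i ks ih =>
    rw [List.foldl_cons, ih, pvFoldlSetLength (fun t j => (t.getD j []).set i (g i j))]

-- closed form of the grid-filling foldl on a non-empty matrix
theorem pvSolveChar' (matrix : List (List Int)) :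
    (List.range matrix.length).foldl (fun t i =>
        (List.range (matrix.headI).length).foldl
          (fun t j => t.set j ((t.getD j []).set i ((matrix.getD i []).getD j 0))) t)
      ((List.range (matrix.headI).length).map (fun _ => List.replicate matrix.length (0 : Int)))
      = (List.range (matrix.headI).length).map
        (fun j => (List.range matrix.length).map (fun i => (matrix.getD i []).getD j 0)) := by
  apply List.ext_getElem
  · rw [pvOuterLength (matrix.headI).length (fun i j => (matrix.getD i []).getD j 0)]
    simp
  · intro j0 h1 h2
    have hj : j0 < (matrix.headI).length := by simpa using h2
    have hinit : ((List.range (matrix.headI).length).map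
        (fun _ => List.replicate matrix.length (0 : Int))).getD j0 []
        = List.replicate matrix.length (0 : Int) := by
      rw [List.getD_eq_getElem?_getD, List.getElem?_map, List.getElem?_range hj]
      rfl
    have hthis := pvOuterGet (matrix.headI).length
      (fun i j => (matrix.getD i []).getD j 0) (List.range matrix.length)
      ((List.range (matrix.headI).length).map
        (fun _ => List.replicate matrix.length (0 : Int)))
      (by simp) j0 hj
    rw [hinit, pvColFold] at hthis
    have hsome := (List.getElem?_eq_getElem h1).symm.trans hthis
    rw [List.getElem_map, List.getElem_range]
    exact Option.some.inj hsome

-- closed form of A's result on a non-empty matrix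
theorem pvSolveChar (matrix : List (List Int)) (hne : matrix ≠ []) :
    solve matrix = (List.range (matrix.headI).length).map
      (fun j => (List.range matrix.length).map (fun i => (matrix.getD i []).getD j 0)) := by
  unfold solve
  rw [if_neg hne]
  exact pvSolveChar' matrix

-- indexing bridge: a map over a list equals a map over its index range
theorem pvMapRange (xs : List (List Int)) (j : Nat) :
    (List.range xs.length).map (fun i => (xs.getD i []).getD j 0)
      = xs.map (fun r => r.getD j 0) := by
  induction xs with
  | nil => simp
  | cons r rs ih =>
    rw [List.length_cons, List.range_succ_eq_map, List.map_cons, List.map_map]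
    simp only [Function.comp_def, List.getD_cons_zero, List.getD_cons_succ]
    rw [ih, List.map_cons]

-- peeling one length-m block off the front of the strided walk
theorem pvStrideBlock (m : Nat) (b rest : List Int) (j : Nat)
    (hb : b.length = m) (hj : j < m) :
    pvStride m ((b ++ rest).drop j) = b.getD j 0 :: pvStride m (rest.drop j) := by
  rw [List.drop_append_of_le_length (by omega)]
  have hbj : j < b.length := by omega
  have hsplit : b.drop j = b[j] :: b.drop (j + 1) := List.drop_eq_getElem_cons hbj
  rw [hsplit, List.cons_append, pvStride.eq_2, List.drop_append]
  have hlen : (b.drop (j + 1)).length = m - j - 1 := by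
    rw [List.length_drop]; omega
  rw [List.drop_eq_nil_of_le (by omega), List.nil_append, hlen]
  have hidx : m - 1 - (m - j - 1) = j := by omega
  rw [hidx, List.getD_eq_getElem?_getD, List.getElem?_eq_getElem hbj]
  rfl

-- closed form of B's stride on the flattened matrix: it reads column j
theorem pvStrideFlat (m : Nat) (j : Nat) (hj : j < m) :
    ∀ (matrix : List (List Int)), (∀ r ∈ matrix, m ≤ r.length) →
    pvStride m ((matrix.flatMap (fun row => row.take m)).drop j)
      = matrix.map (fun r => r.getD j 0) := by
  intro matrix
  induction matrix with
  | nil => intro _; simp [pvStride.eq_1]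
  | cons r rs ih =>
    intro hall
    rw [List.flatMap_cons, pvStrideBlock m (r.take m) _ j
      (by rw [List.length_take]; have := hall r (by simp); omega) hj,
      ih (fun x hx => hall x (by simp [hx])), List.map_cons]
    congr 1
    rw [List.getD_eq_getElem?_getD, List.getD_eq_getElem?_getD, List.getElem?_take]
    simp [hj]

-- ===== VERDICT (by name: the statement is the Claim_ definition above) =====
theorem solve_spec : Claim_equal_solve := by
  intro matrix _ hpre
  unfold Spec_solve
  by_cases hne : matrix = []
  · subst hne; rfl
  · rw [pvSolveChar matrix hne]
    unfold solve_alt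
    rw [if_neg hne]
    apply List.map_congr_left
    intro j hj
    have hjm : j < (matrix.headI).length := List.mem_range.mp hj
    rw [pvStrideFlat (matrix.headI).length j hjm matrix hpre, pvMapRange]
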